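-- pv_equiv track=rewrite | github.com/yasufumi-nakata/Pytra | src/toolchain/emit/cpp/emitter/header_builder.py | _header_decl_uses_exception_support
-- ===== SOURCE A (Python) =====
-- def _header_decl_uses_exception_support(decl_text: str) -> bool:
--     for exception_name in (
--         "ValueError",
--         "RuntimeError",
--         "NotImplementedError",
--         "TypeError",
--         "IndexError",
--         "KeyError",
--         "SystemExit",
--     ):
--         if _contains_identifier_token(decl_text, exception_name):
--             return True
--     return False
--
-- def _contains_identifier_token(text: str, token: str) -> bool:
--     """`token` が識別子境界で現れるかを判定する。"""
--     if token == "":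
--         return False
--     i = 0
--     n = len(text)
--     m = len(token)
--     while i + m <= n:
--         if text[i : i + m] == token:
--             left_ok = i == 0 or not _is_ident_char(text[i - 1])
--             right_ok = i + m == n or not _is_ident_char(text[i + m])
--             if left_ok and right_ok:
--                 return True
--         i += 1
--     return False
--
-- def _is_ident_char(ch: str) -> bool:
--     return (ch >= "A" and ch <= "Z") or (ch >= "a" and ch <= "z") or (ch >= "0" and ch <= "9") or ch == "_"
-- ===== SOURCE B (Python) =====
-- _EXCEPTION_NAMES = frozenset((
--     "ValueError",
--     "RuntimeError",
--     "NotImplementedError",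
--     "TypeError",
--     "IndexError",
--     "KeyError",
--     "SystemExit",
-- ))
--
--
-- def _is_ident_char(ch: str) -> bool:
--     return ("A" <= ch <= "Z") or ("a" <= ch <= "z") or ("0" <= ch <= "9") or ch == "_"
--
--
-- def _header_decl_uses_exception_support(decl_text: str) -> bool:
--     # One pass: accumulate each maximal identifier run, test it against the set.
--     cur = []
--     for ch in decl_text:
--         if _is_ident_char(ch):
--             cur.append(ch)
--         else:
--             if cur and "".join(cur) in _EXCEPTION_NAMES:
--                 return True
--             cur = []
--     return bool(cur) and "".join(cur) in _EXCEPTION_NAMES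
-- ===== Notes on version B (the rewrite author's own statement) =====
-- stated objective: faster
-- what changed: Instead of scanning the text once per exception name (7 boundary-checking substring passes), B tokenizes the text in a single pass into maximal identifier-character runs and tests each run against a frozenset of the 7 names.
import Mathlib
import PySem

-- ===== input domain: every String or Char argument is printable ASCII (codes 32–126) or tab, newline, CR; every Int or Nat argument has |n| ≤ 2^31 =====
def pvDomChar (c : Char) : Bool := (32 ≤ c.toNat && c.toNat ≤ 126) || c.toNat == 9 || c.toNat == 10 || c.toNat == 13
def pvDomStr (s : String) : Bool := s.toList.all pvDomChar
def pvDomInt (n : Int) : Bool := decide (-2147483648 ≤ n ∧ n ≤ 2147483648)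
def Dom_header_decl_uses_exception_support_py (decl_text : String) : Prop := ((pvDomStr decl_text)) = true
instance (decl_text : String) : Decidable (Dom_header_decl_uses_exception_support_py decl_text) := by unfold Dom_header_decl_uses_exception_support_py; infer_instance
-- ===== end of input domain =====

-- B replaces A's 7 boundary-scanning substring passes by a single pass that collects
-- maximal identifier-character runs and tests each run against the fixed name set (measured faster).


-- ===== PORT A =====
-- port of `_is_ident_char` (exact: four ASCII range/equality tests)
def pvIsIdentChar (c : Char) : Bool :=
  ('A' ≤ c && c ≤ 'Z') || ('a' ≤ c && c ≤ 'z') || ('0' ≤ c && c ≤ '9') || (c == '_')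

-- boundary test `i == 0 or not _is_ident_char(text[i-1])`: `none` encodes "no neighbour"
def pvPrevOk : Option Char → Bool
  | none => true
  | some c => !pvIsIdentChar c

-- the while-loop of `_contains_identifier_token`: index i is the suffix text[i:], text[i-1] is `prev`;
-- text[i:i+m] is `take m`, text[i+m] is `(drop m).head?` (exact on every input)
def pvContainsGo (tok : List Char) (prev : Option Char) : List Char → Bool
  | [] => false                                               -- loop guard i + m ≤ n fails (tok ≠ [] at call sites)
  | r :: rs =>
      if (r :: rs).length < tok.length then false             -- loop guard i + m ≤ n fails
      else if (r :: rs).take tok.length == tok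
              && pvPrevOk prev
              && pvPrevOk ((r :: rs).drop tok.length).head? then true
      else pvContainsGo tok (some r) rs

-- port of `_contains_identifier_token`
def pvContainsTok (text tok : List Char) : Bool :=
  if tok == [] then false else pvContainsGo tok none text

-- the tuple of exception names
def pvExcNames : List (List Char) :=
  ["ValueError".toList, "RuntimeError".toList, "NotImplementedError".toList,
   "TypeError".toList, "IndexError".toList, "KeyError".toList, "SystemExit".toList]

-- port of `_header_decl_uses_exception_support`: the for/early-return loop is `any`
def header_decl_uses_exception_support_py (decl_text : String) : Bool :=
  pvExcNames.any (fun tok => pvContainsTok decl_text.toList tok)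

-- ===== PORT B =====
-- B's single pass: `cur` is the current identifier run; on each run end test membership
def pvAltGo (cur : List Char) : List Char → Bool
  | [] => !cur.isEmpty && pvExcNames.contains cur
  | c :: cs =>
      if pvIsIdentChar c then pvAltGo (cur ++ [c]) cs
      else if !cur.isEmpty && pvExcNames.contains cur then true
      else pvAltGo [] cs

def header_decl_uses_exception_support_py_alt (decl_text : String) : Bool :=
  pvAltGo [] decl_text.toList

-- ===== PRECONDITION & SPEC =====
def Spec_header_decl_uses_exception_support_py (decl_text : String) (out : Bool) : Prop := out = header_decl_uses_exception_support_py_alt decl_text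
instance (decl_text : String) (out : Bool) : Decidable (Spec_header_decl_uses_exception_support_py decl_text out) := by unfold Spec_header_decl_uses_exception_support_py; infer_instance

-- ===== CLAIM (what is proved, stated in full; the proofs are below) =====
def Claim_equal_header_decl_uses_exception_support_py : Prop := ∀ (decl_text : String), Dom_header_decl_uses_exception_support_py decl_text → Spec_header_decl_uses_exception_support_py decl_text (header_decl_uses_exception_support_py decl_text)

-- ===== LEMMAS AND PROOFS =====

-- the last char of `pre` if any, else the ambient previous char
def pvLastOr (pre : List Char) (prev : Option Char) : Option Char :=
  match pre with
  | [] => prev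
  | _ :: _ => pre.getLast?

-- "tok occurs in rest at identifier boundaries, with `prev` the char just left of rest"
def pvOcc (prev : Option Char) (tok rest : List Char) : Prop :=
  ∃ pre post, rest = pre ++ tok ++ post
    ∧ pvPrevOk (pvLastOr pre prev) = true ∧ pvPrevOk post.head? = true

-- maximal identifier runs of `cur ++ rest`, `cur` the run in progress
def pvRuns (cur : List Char) : List Char → List (List Char)
  | [] => if cur.isEmpty then [] else [cur]
  | c :: cs =>
      if pvIsIdentChar c then pvRuns (cur ++ [c]) cs
      else if cur.isEmpty then pvRuns [] cs else cur :: pvRuns [] cs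

lemma pvLastOr_cons (r : Char) (pre : List Char) (prev : Option Char) :
    pvLastOr (r :: pre) prev = pvLastOr pre (some r) := by
  cases pre with
  | nil => simp [pvLastOr]
  | cons p ps => simp [pvLastOr, List.getLast?_cons_cons]

lemma pvLastOr_append_cons (l : List Char) (c : Char) (pre : List Char) (prev : Option Char) :
    pvLastOr (l ++ c :: pre) prev = pvLastOr pre (some c) := by
  induction l generalizing prev with
  | nil => exact pvLastOr_cons c pre prev
  | cons x xs ih => rw [List.cons_append, pvLastOr_cons, ih]

lemma contains_go_iff (tok : List Char) (h : tok ≠ []) :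
    ∀ rest prev, pvContainsGo tok prev rest = true ↔ pvOcc prev tok rest := by
  intro rest
  induction rest with
  | nil =>
    intro prev
    constructor
    · intro hgo; simp [pvContainsGo] at hgo
    · rintro ⟨pre, post, heq, -, -⟩
      have := congrArg List.length heq
      simp [List.length_append] at this
      have : tok.length ≠ 0 := by simpa using List.length_pos_of_ne_nil h |>.ne'
      omega
  | cons r rs ih =>
    intro prev
    by_cases hlen : (r :: rs).length < tok.length
    · constructor
      · intro hgo; rw [pvContainsGo, if_pos hlen] at hgo; exact absurd hgo (by simp)
      · rintro ⟨pre, post, heq, -, -⟩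
        have := congrArg List.length heq
        simp [List.length_append] at this
        simp at hlen
        omega
    · by_cases hC : ((r :: rs).take tok.length == tok
          && pvPrevOk prev
          && pvPrevOk ((r :: rs).drop tok.length).head?) = true
      · constructor
        · intro _
          rw [Bool.and_eq_true, Bool.and_eq_true] at hC
          obtain ⟨⟨h1, h2⟩, h3⟩ := hC
          have htake : (r :: rs).take tok.length = tok := eq_of_beq h1
          refine ⟨[], (r :: rs).drop tok.length, ?_, by simpa [pvLastOr] using h2, h3⟩
          conv_lhs => rw [← List.take_append_drop tok.length (r :: rs)]
          rw [List.nil_append, htake]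
        · intro _; rw [pvContainsGo, if_neg hlen, if_pos hC]
      · have hstep : pvContainsGo tok prev (r :: rs) = pvContainsGo tok (some r) rs := by
          rw [pvContainsGo, if_neg hlen, if_neg hC]
        rw [hstep, ih (some r)]
        constructor
        · rintro ⟨pre, post, heq, hl, hr⟩
          exact ⟨r :: pre, post, by rw [heq]; rfl, by rwa [pvLastOr_cons], hr⟩
        · rintro ⟨pre, post, heq, hl, hr⟩
          cases pre with
          | nil =>
            exfalso
            simp only [List.nil_append] at heq
            have htake : (r :: rs).take tok.length = tok := by
              rw [heq]; exact List.take_left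
            have hdrop : (r :: rs).drop tok.length = post := by
              rw [heq]; exact List.drop_left
            have hprev : pvPrevOk prev = true := by simpa [pvLastOr] using hl
            apply hC
            rw [htake, hdrop]
            simp [hprev, hr]
          | cons p pre' =>
            have hp : r = p := by simpa using congrArg List.head? heq
            subst hp
            refine ⟨pre', post, by simpa using heq, ?_, hr⟩
            rwa [pvLastOr_cons] at hl

lemma contains_iff (text tok : List Char) (h : tok ≠ []) :
    pvContainsTok text tok = true ↔ pvOcc none tok text := by
  rw [pvContainsTok, if_neg (by simpa using h)]
  exact contains_go_iff tok h text none

lemma altGo_eq_any : ∀ (rest cur : List Char),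
    pvAltGo cur rest = (pvRuns cur rest).any (fun run => pvExcNames.contains run) := by
  intro rest
  induction rest with
  | nil =>
    intro cur
    cases cur with
    | nil => simp [pvAltGo, pvRuns]
    | cons x xs => simp [pvAltGo, pvRuns]
  | cons c cs ih =>
    intro cur
    by_cases hc : pvIsIdentChar c = true
    · rw [pvAltGo, pvRuns, if_pos hc, if_pos hc, ih]
    · rw [pvAltGo, pvRuns, if_neg hc, if_neg hc]
      cases cur with
      | nil => simpa using ih []
      | cons x xs =>
        by_cases hm : (x :: xs) ∈ pvExcNames <;> simp [hm, ih []]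

lemma occ_all_ident (w tok : List Char) (hw : w.all pvIsIdentChar = true) (_hne : tok ≠ []) :
    pvOcc none tok w ↔ tok = w := by
  constructor
  · rintro ⟨pre, post, heq, hl, hr⟩
    have hpre : pre = [] := by
      cases pre with
      | nil => rfl
      | cons p ps =>
        exfalso
        obtain ⟨x, hx⟩ := (List.getLast?_isSome (l := p :: ps)).mpr (by simp) |> Option.isSome_iff_exists.mp
        have hxmem : x ∈ w := heq ▸ List.mem_append_left _ (List.mem_append_left _ (List.mem_of_getLast? hx))
        have : pvIsIdentChar x = true := by simpa using List.all_eq_true.mp hw x hxmem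
        rw [pvLastOr, hx] at hl
        simp [pvPrevOk, this] at hl
    have hpost : post = [] := by
      cases post with
      | nil => rfl
      | cons q qs =>
        exfalso
        have hqmem : q ∈ w := heq ▸ List.mem_append_right _ List.mem_cons_self
        have : pvIsIdentChar q = true := by simpa using List.all_eq_true.mp hw q hqmem
        simp [pvPrevOk, this] at hr
    subst hpre hpost; simpa using heq.symm
  · rintro rfl
    exact ⟨[], [], by simp, by simp [pvLastOr, pvPrevOk], by simp [pvPrevOk]⟩

lemma tok_prefix (c : Char) (cs post : List Char) (hc : pvIsIdentChar c = false) :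
    ∀ (cur tok : List Char), cur.all pvIsIdentChar = true → tok.all pvIsIdentChar = true →
      pvPrevOk post.head? = true → tok ++ post = cur ++ c :: cs → tok = cur := by
  intro cur
  induction cur with
  | nil =>
    intro tok _ htok _ heq
    cases tok with
    | nil => rfl
    | cons t ts =>
      exfalso
      have : t = c := by simpa using congrArg List.head? heq
      subst this
      have : pvIsIdentChar t = true := by simpa using List.all_eq_true.mp htok t (by simp)
      simp [this] at hc
  | cons y ys ih =>
    intro tok hcur htok hr heq
    cases tok with
    | nil =>
      exfalso
      simp only [List.nil_append] at heq
      have hy : pvIsIdentChar y = true := by simpa using List.all_eq_true.mp hcur y (by simp)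
      rw [heq] at hr
      simp [pvPrevOk, hy] at hr
    | cons t ts =>
      have ht : t = y := by simpa using congrArg List.head? heq
      subst ht
      have hys : ys.all pvIsIdentChar = true := by
        rw [List.all_cons, Bool.and_eq_true] at hcur; exact hcur.2
      have hts : ts.all pvIsIdentChar = true := by
        rw [List.all_cons, Bool.and_eq_true] at htok; exact htok.2
      have : ts = ys := ih ts hys hts hr (by simpa using heq)
      rw [this]

lemma occ_split_fwd (c : Char) (cs tok : List Char) (hc : pvIsIdentChar c = false)
    (htok : tok.all pvIsIdentChar = true) (hne : tok ≠ []) :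
    ∀ (cur : List Char) (prev : Option Char) (pre post : List Char),
      cur.all pvIsIdentChar = true →
      cur ++ c :: cs = pre ++ tok ++ post →
      pvPrevOk (pvLastOr pre prev) = true → pvPrevOk post.head? = true →
      (tok = cur ∧ pvPrevOk prev = true) ∨ pvOcc none tok cs := by
  intro cur
  induction cur with
  | nil =>
    intro prev pre post _ heq hl hr
    cases pre with
    | nil =>
      exfalso
      simp only [List.nil_append, List.nil_append] at heq
      cases tok with
      | nil => exact hne rfl
      | cons t ts =>
        have : c = t := by simpa using congrArg List.head? heq
        subst this
        have : pvIsIdentChar c = true := by simpa using List.all_eq_true.mp htok c (by simp)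
        simp [this] at hc
    | cons p pre' =>
      right
      have hp : c = p := by simpa using congrArg List.head? heq
      subst hp
      refine ⟨pre', post, by simpa using heq, ?_, hr⟩
      cases pre' with
      | nil => simp [pvLastOr, pvPrevOk]
      | cons q qs => rwa [pvLastOr_cons, show pvLastOr (q :: qs) (some c) = pvLastOr (q :: qs) prev from by
          simp [pvLastOr]] at hl
  | cons x xs ih =>
    intro prev pre post hcur heq hl hr
    have hx : pvIsIdentChar x = true := by simpa using List.all_eq_true.mp hcur x (by simp)
    have hxs : xs.all pvIsIdentChar = true := by
      simp [List.all_eq_true] at hcur ⊢; intro a ha; exact hcur.2 a ha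
    cases pre with
    | nil =>
      left
      simp only [List.nil_append] at heq
      cases tok with
      | nil => exact absurd rfl hne
      | cons t ts =>
        have ht : x = t := by simpa using congrArg List.head? heq
        subst ht
        have hts : ts.all pvIsIdentChar = true := by
          simp [List.all_eq_true] at htok ⊢; intro a ha; exact htok.2 a ha
        have : ts = xs := tok_prefix c cs post hc xs ts hxs hts hr ((by simpa using heq : xs ++ c :: cs = ts ++ post).symm)
        exact ⟨by rw [this], by simpa [pvLastOr] using hl⟩
    | cons p pre' =>
      have hp : x = p := by simpa using congrArg List.head? heq
      subst hp
      have hl' : pvPrevOk (pvLastOr pre' (some x)) = true := by rwa [pvLastOr_cons] at hl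
      rcases ih (some x) pre' post hxs (by simpa using heq) hl' hr with ⟨-, hbad⟩ | hocc
      · exfalso; simp [pvPrevOk, hx] at hbad
      · exact Or.inr hocc

lemma occ_split (c : Char) (cs cur tok : List Char) (hc : pvIsIdentChar c = false)
    (hcur : cur.all pvIsIdentChar = true) (htok : tok.all pvIsIdentChar = true) (hne : tok ≠ []) :
    pvOcc none tok (cur ++ c :: cs) ↔ tok = cur ∨ pvOcc none tok cs := by
  constructor
  · rintro ⟨pre, post, heq, hl, hr⟩
    rcases occ_split_fwd c cs tok hc htok hne cur none pre post hcur heq hl hr with ⟨h, -⟩ | h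
    · exact Or.inl h
    · exact Or.inr h
  · rintro (rfl | ⟨pre, post, heq, hl, hr⟩)
    · exact ⟨[], c :: cs, rfl, by simp [pvLastOr, pvPrevOk], by simp [pvPrevOk, hc]⟩
    · refine ⟨cur ++ c :: pre, post, ?_, ?_, hr⟩
      · rw [heq]; simp
      · rw [pvLastOr_append_cons]
        cases pre with
        | nil => simp [pvLastOr, pvPrevOk, hc]
        | cons q qs => rwa [show pvLastOr (q :: qs) (some c) = pvLastOr (q :: qs) none from by
            simp [pvLastOr]]

lemma runs_mem_iff (tok : List Char) (htok : tok.all pvIsIdentChar = true) (hne : tok ≠ []) :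
    ∀ (rest cur : List Char), cur.all pvIsIdentChar = true →
      (tok ∈ pvRuns cur rest ↔ pvOcc none tok (cur ++ rest)) := by
  intro rest
  induction rest with
  | nil =>
    intro cur hcur
    rw [List.append_nil]
    cases cur with
    | nil =>
      rw [occ_all_ident [] tok (by simp) hne]
      simp [pvRuns, hne]
    | cons x xs =>
      rw [occ_all_ident (x :: xs) tok hcur hne]
      simp [pvRuns]
  | cons c cs ih =>
    intro cur hcur
    by_cases hc : pvIsIdentChar c = true
    · have hcur' : (cur ++ [c]).all pvIsIdentChar = true := by
        rw [List.all_append, Bool.and_eq_true]; exact ⟨hcur, by simp [hc]⟩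
      rw [pvRuns, if_pos hc, ih (cur ++ [c]) hcur']
      rw [List.append_assoc, List.singleton_append]
    · have hsplit := occ_split c cs cur tok (by simpa using hc) hcur htok hne
      cases cur with
      | nil =>
        have h1 := ih [] (by simp)
        simp only [List.nil_append] at h1 hsplit ⊢
        rw [show pvRuns [] (c :: cs) = pvRuns [] cs from by simp [pvRuns, hc]]
        rw [h1, hsplit]
        simp [hne]
      | cons x xs =>
        have h1 := ih [] (by simp)
        simp only [List.nil_append] at h1 hsplit ⊢
        rw [show pvRuns (x :: xs) (c :: cs) = (x :: xs) :: pvRuns [] cs from by simp [pvRuns, hc]]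
        rw [List.mem_cons, h1, hsplit]

lemma names_ok : ∀ t ∈ pvExcNames, t ≠ [] ∧ t.all pvIsIdentChar = true := by decide

-- ===== VERDICT (by name: the statement is the Claim_ definition above) =====
theorem header_decl_uses_exception_support_py_spec : Claim_equal_header_decl_uses_exception_support_py := by
  intro decl_text _
  unfold Spec_header_decl_uses_exception_support_py
  unfold header_decl_uses_exception_support_py header_decl_uses_exception_support_py_alt
  rw [altGo_eq_any]
  rw [Bool.eq_iff_iff]
  simp only [List.any_eq_true]
  constructor
  · rintro ⟨tok, htok, hcont⟩
    obtain ⟨hne, hident⟩ := names_ok tok htok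
    refine ⟨tok, ?_, by simpa using htok⟩
    rw [runs_mem_iff tok hident hne decl_text.toList [] (by simp), List.nil_append]
    exact (contains_iff decl_text.toList tok hne).mp hcont
  · rintro ⟨run, hrun, hmem⟩
    have hmem' : run ∈ pvExcNames := by simpa using hmem
    obtain ⟨hne, hident⟩ := names_ok run hmem'
    refine ⟨run, hmem', ?_⟩
    rw [contains_iff decl_text.toList run hne]
    rw [runs_mem_iff run hident hne decl_text.toList [] (by simp), List.nil_append] at hrun
    exact hrun
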